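-- pv_equiv track=rewrite | github.com/PumpkinPieM/op_agent | skills/_shared/operator-facts/scripts/unit_coverage_scan.py | contains_binary_operator
-- ===== SOURCE A (Python) =====
-- from typing import Dict, Iterable, List, Optional, Set, Tuple
--
-- LEFT_OPERAND_CHARS = set(")]}_\"'0123456789abcdefghijklmnopqrstuvwxyzABCDEFGHIJKLMNOPQRSTUVWXYZ")
--
-- RIGHT_OPERAND_CHARS = set("([{\"'0123456789abcdefghijklmnopqrstuvwxyzABCDEFGHIJKLMNOPQRSTUVWXYZ_")
--
-- def contains_binary_operator(text: str, operator: str) -> bool: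
--     for index, char in enumerate(text):
--         if char != operator:
--             continue
--         prev_char = previous_non_space_char(text, index)
--         next_char = next_non_space_char(text, index)
--         if prev_char is None or next_char is None:
--             continue
--         if operator == "+" and next_char == "+":
--             continue
--         if operator == "-" and next_char == "-":
--             continue
--         if next_char == "=":
--             continue
--         if prev_char not in LEFT_OPERAND_CHARS:
--             continue
--         if next_char not in RIGHT_OPERAND_CHARS:
--             continue
--         return True
--     return False
--
-- def previous_non_space_char(text: str, index: int) -> Optional[str]:
--     pos = index - 1
--     while pos >= 0:
--         char = text[pos]
--         if not char.isspace():
--             return char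
--         pos -= 1
--     return None
--
-- def next_non_space_char(text: str, index: int) -> Optional[str]:
--     pos = index + 1
--     while pos < len(text):
--         char = text[pos]
--         if not char.isspace():
--             return char
--         pos += 1
--     return None
-- ===== SOURCE B (Python) =====
-- LEFT_OPERAND_CHARS = set(")]}_\"'0123456789abcdefghijklmnopqrstuvwxyzABCDEFGHIJKLMNOPQRSTUVWXYZ")
--
-- RIGHT_OPERAND_CHARS = set("([{\"'0123456789abcdefghijklmnopqrstuvwxyzABCDEFGHIJKLMNOPQRSTUVWXYZ_")
--
-- def contains_binary_operator(text: str, operator: str) -> bool: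
--     # Single forward pass (alternative to per-occurrence rescans): last = most recent non-space char; pending = (prev,) of an
--     # operator occurrence whose following non-space neighbour is still unseen.
--     last = None
--     pending = None
--     for ch in text:
--         space = ch.isspace()
--         if not space and pending is not None:
--             (prev,) = pending
--             pending = None
--             if (prev is not None
--                     and not (operator == "+" and ch == "+")
--                     and not (operator == "-" and ch == "-")
--                     and ch != "="
--                     and prev in LEFT_OPERAND_CHARS
--                     and ch in RIGHT_OPERAND_CHARS):
--                 return True
--         if ch == operator:
--             pending = (last,)
--         if not space:
--             last = ch
--     return False
-- ===== Notes on version B (the rewrite author's own statement) =====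
-- stated objective: alternative
-- what changed: Replaced the per-occurrence backward/forward rescans for the nearest non-space neighbours by a single forward pass that carries the last non-space char and one pending unresolved operator occurrence; worst case drops from quadratic to linear, but on typical text A is already linear so no measured speedup.
import Mathlib
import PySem

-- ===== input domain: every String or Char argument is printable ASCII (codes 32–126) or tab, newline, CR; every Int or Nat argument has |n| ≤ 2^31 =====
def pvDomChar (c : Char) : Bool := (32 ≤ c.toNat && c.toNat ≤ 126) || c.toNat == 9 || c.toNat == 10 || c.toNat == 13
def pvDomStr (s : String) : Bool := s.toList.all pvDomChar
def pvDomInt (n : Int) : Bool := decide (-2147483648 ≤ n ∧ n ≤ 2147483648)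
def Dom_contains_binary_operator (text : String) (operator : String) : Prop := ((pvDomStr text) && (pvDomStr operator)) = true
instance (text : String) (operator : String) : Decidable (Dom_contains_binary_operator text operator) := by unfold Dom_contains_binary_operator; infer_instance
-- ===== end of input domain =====

-- B replaces A's per-occurrence neighbour rescans by a single forward pass keeping the
-- last non-space char and one pending unresolved operator occurrence (objective: alternative).


-- ===== PORT A =====
def pvLeftChars : PySem.Set Char :=
  PySem.Set.ofList ")]}_\"'0123456789abcdefghijklmnopqrstuvwxyzABCDEFGHIJKLMNOPQRSTUVWXYZ".toList

def pvRightChars : PySem.Set Char :=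
  PySem.Set.ofList "([{\"'0123456789abcdefghijklmnopqrstuvwxyzABCDEFGHIJKLMNOPQRSTUVWXYZ_".toList

-- previous_non_space_char / next_non_space_char: the while loops scan for the first
-- non-space char, backwards from index-1 (= over the reversed prefix) resp. forwards
-- from index+1 (= over the suffix); this helper is that scan.
def pvFirstNonSpace : List Char → Option Char
  | [] => none
  | c :: r => if PySem.Chars.isspace c then pvFirstNonSpace r else some c

-- the enumerate loop: rev is the reversed prefix of already-passed chars
def pvAGo (operator : String) (rev : List Char) : List Char → Bool
  | [] => false
  | c :: rest =>
    let hit : Bool :=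
      if String.ofList [c] == operator then
        match pvFirstNonSpace rev, pvFirstNonSpace rest with   -- prev_char, next_char
        | some p, some n =>
          !(operator == "+" && n == '+') && !(operator == "-" && n == '-')
            && n != '=' && pvLeftChars.contains p && pvRightChars.contains n
        | _, _ => false                                        -- prev/next is None
      else false
    if hit then true else pvAGo operator (c :: rev) rest

def contains_binary_operator (text : String) (operator : String) : Bool :=
  pvAGo operator [] text.toList

-- ===== PORT B =====
def pvBGuard (operator : String) (prevOpt : Option Char) (n : Char) : Bool :=
  match prevOpt with
  | none => false
  | some p =>
    !(operator == "+" && n == '+') && !(operator == "-" && n == '-')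
      && n != '=' && pvLeftChars.contains p && pvRightChars.contains n

def pvBGo (operator : String) (last : Option Char) (pending : Option (Option Char)) :
    List Char → Bool
  | [] => false
  | c :: rest =>
    let space := PySem.Chars.isspace c
    let hit : Bool :=
      if !space then
        match pending with
        | some p => pvBGuard operator p c
        | none => false
      else false
    if hit then true
    else
      let pending1 := if space then pending else none
      let pending2 := if String.ofList [c] == operator then some last else pending1
      let last2 := if space then last else some c
      pvBGo operator last2 pending2 rest

def contains_binary_operator_alt (text : String) (operator : String) : Bool :=
  pvBGo operator none none text.toList

-- ===== PRECONDITION & SPEC =====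
def Spec_contains_binary_operator (text : String) (operator : String) (out : Bool) : Prop := out = contains_binary_operator_alt text operator
instance (text : String) (operator : String) (out : Bool) : Decidable (Spec_contains_binary_operator text operator out) := by unfold Spec_contains_binary_operator; infer_instance

-- ===== CLAIM (what is proved, stated in full; the proofs are below) =====
def Claim_equal_contains_binary_operator : Prop := ∀ (text : String) (operator : String), Dom_contains_binary_operator text operator → Spec_contains_binary_operator text operator (contains_binary_operator text operator)

-- ===== LEMMAS AND PROOFS =====

-- pending state B carries after having consumed (reverse rev) of the text
def pvPendOf (operator : String) : List Char → Option (Option Char)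
  | [] => none
  | c :: r =>
    if String.ofList [c] == operator then some (pvFirstNonSpace r)
    else if PySem.Chars.isspace c then pvPendOf operator r
    else none

-- whether a pending occurrence gets resolved to True by the upcoming suffix
def pvPendRes (operator : String) (pending : Option (Option Char)) (suf : List Char) : Bool :=
  match pending with
  | some p =>
    match pvFirstNonSpace suf with
    | some n => pvBGuard operator p n
    | none => false
  | none => false

lemma pvPendOf_firstNS (operator : String) (c : Char) (hs : PySem.Chars.isspace c = true)
    (hop : (String.ofList [c] == operator) = true) :
    ∀ rev q, pvPendOf operator rev = some q → pvFirstNonSpace rev = q := by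
  intro rev
  induction rev with
  | nil => intro q h; simp [pvPendOf] at h
  | cons d r ih =>
    intro q h
    by_cases hd : (String.ofList [d] == operator) = true
    · have hde : d = c := by
        have h2 : String.ofList [d] = String.ofList [c] := by
          rw [eq_of_beq hd, eq_of_beq hop]
        have h3 := congrArg String.toList h2
        simp [String.toList_ofList] at h3
        exact h3
      simp [pvPendOf, hd] at h
      simp [pvFirstNonSpace, hde, hs, ← h]
    · by_cases hsp : PySem.Chars.isspace d = true
      · simp [pvPendOf, hd, hsp] at h
        simpa [pvFirstNonSpace, hsp] using ih q h
      · simp [pvPendOf, hd, hsp] at h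

lemma pvMain (operator : String) :
    ∀ (suf rev : List Char),
      pvBGo operator (pvFirstNonSpace rev) (pvPendOf operator rev) suf
        = (pvPendRes operator (pvPendOf operator rev) suf || pvAGo operator rev suf) := by
  intro suf
  induction suf with
  | nil => intro rev; simp [pvBGo, pvAGo, pvPendRes]; cases pvPendOf operator rev <;> rfl
  | cons c rest ih =>
    intro rev
    by_cases hsp : PySem.Chars.isspace c = true
    · -- whitespace char
      by_cases hop : (String.ofList [c] == operator) = true
      · -- whitespace operator occurrence
        have hpend : pvPendOf operator (c :: rev) = some (pvFirstNonSpace rev) := by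
          simp [pvPendOf, hop]
        have hfs : pvFirstNonSpace (c :: rev) = pvFirstNonSpace rev := by
          simp [pvFirstNonSpace, hsp]
        have hB : pvBGo operator (pvFirstNonSpace rev) (pvPendOf operator rev) (c :: rest)
            = pvBGo operator (pvFirstNonSpace rev) (some (pvFirstNonSpace rev)) rest := by
          simp [pvBGo, hsp, hop]
        rw [hB]
        have := ih (c :: rev)
        rw [hfs, hpend] at this
        rw [this]
        -- RHS
        have hA : pvAGo operator rev (c :: rest)
            = (pvPendRes operator (some (pvFirstNonSpace rev)) rest
                || pvAGo operator (c :: rev) rest) := by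
          simp only [pvAGo, pvPendRes, hop, if_pos rfl]
          have hfsr : pvFirstNonSpace (c :: rest) = pvFirstNonSpace rest := by
            simp [pvFirstNonSpace, hsp]
          cases hprev : pvFirstNonSpace rev with
          | none =>
            cases hn : pvFirstNonSpace rest with
            | none => simp [pvBGuard, hn]
            | some n => simp [pvBGuard, hn]
          | some p =>
            cases hn : pvFirstNonSpace rest with
            | none => simp [pvBGuard, hn]
            | some n =>
              simp only [hn, pvBGuard]
              cases hg : (!(operator == "+" && n == '+') && !(operator == "-" && n == '-')
                  && n != '=' && pvLeftChars.contains p && pvRightChars.contains n) <;>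
                simp [hg]
        rw [hA]
        -- need: pendRes (pendOf rev) (c::rest) absorbed: if pendOf rev = some q then q = firstNS rev
        cases hpo : pvPendOf operator rev with
        | none => simp [pvPendRes]
        | some q =>
          have hq : pvFirstNonSpace rev = q := pvPendOf_firstNS operator c hsp hop rev q hpo
          have hfsr : pvFirstNonSpace (c :: rest) = pvFirstNonSpace rest := by
            simp [pvFirstNonSpace, hsp]
          simp [pvPendRes, hq, hfsr, Bool.or_assoc]
      · -- whitespace, not the operator
        have hpend : pvPendOf operator (c :: rev) = pvPendOf operator rev := by
          simp [pvPendOf, hop, hsp]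
        have hfs : pvFirstNonSpace (c :: rev) = pvFirstNonSpace rev := by
          simp [pvFirstNonSpace, hsp]
        have hB : pvBGo operator (pvFirstNonSpace rev) (pvPendOf operator rev) (c :: rest)
            = pvBGo operator (pvFirstNonSpace rev) (pvPendOf operator rev) rest := by
          simp [pvBGo, hsp, hop]
        rw [hB]
        have := ih (c :: rev)
        rw [hfs, hpend] at this
        rw [this]
        have hA : pvAGo operator rev (c :: rest) = pvAGo operator (c :: rev) rest := by
          simp [pvAGo, hop]
        have hfsr : pvFirstNonSpace (c :: rest) = pvFirstNonSpace rest := by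
          simp [pvFirstNonSpace, hsp]
        rw [hA]
        cases pvPendOf operator rev with
        | none => simp [pvPendRes]
        | some q => simp [pvPendRes, hfsr]
    · -- non-space char
      have hfsr : pvFirstNonSpace (c :: rest) = some c := by
        simp [pvFirstNonSpace, hsp]
      have hhit : pvPendRes operator (pvPendOf operator rev) (c :: rest)
          = (match pvPendOf operator rev with
             | some p => pvBGuard operator p c
             | none => false) := by
        cases pvPendOf operator rev with
        | none => simp [pvPendRes]
        | some p => simp [pvPendRes, hfsr]
      by_cases hres : (match pvPendOf operator rev with
          | some p => pvBGuard operator p c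
          | none => false) = true
      · -- B resolves pending to True here
        have hB : pvBGo operator (pvFirstNonSpace rev) (pvPendOf operator rev) (c :: rest)
            = true := by
          simp [pvBGo, hsp, hres]
        rw [hB, hhit, hres]
        simp
      · have hresf : (match pvPendOf operator rev with
            | some p => pvBGuard operator p c
            | none => false) = false := by
          cases h : (match pvPendOf operator rev with
              | some p => pvBGuard operator p c
              | none => false) with
          | false => rfl
          | true => exact absurd h hres
        by_cases hop : (String.ofList [c] == operator) = true
        · -- operator occurrence (non-space)
          have hpend : pvPendOf operator (c :: rev) = some (pvFirstNonSpace rev) := by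
            simp [pvPendOf, hop]
          have hfs : pvFirstNonSpace (c :: rev) = some c := by
            simp [pvFirstNonSpace, hsp]
          have hB : pvBGo operator (pvFirstNonSpace rev) (pvPendOf operator rev) (c :: rest)
              = pvBGo operator (some c) (some (pvFirstNonSpace rev)) rest := by
            simp [pvBGo, hsp, hresf, hop]
          rw [hB]
          have := ih (c :: rev)
          rw [hfs, hpend] at this
          rw [this]
          have hA : pvAGo operator rev (c :: rest)
              = (pvPendRes operator (some (pvFirstNonSpace rev)) rest
                  || pvAGo operator (c :: rev) rest) := by
            simp only [pvAGo, pvPendRes, hop, if_pos rfl]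
            cases hprev : pvFirstNonSpace rev with
            | none =>
              cases hn : pvFirstNonSpace rest with
              | none => simp [pvBGuard, hn]
              | some n => simp [pvBGuard, hn]
            | some p =>
              cases hn : pvFirstNonSpace rest with
              | none => simp [pvBGuard, hn]
              | some n =>
                simp only [hn, pvBGuard]
                cases hg : (!(operator == "+" && n == '+') && !(operator == "-" && n == '-')
                    && n != '=' && pvLeftChars.contains p && pvRightChars.contains n) <;>
                  simp [hg]
          rw [hA, hhit, hresf]
          simp
        · -- ordinary non-space char
          have hpend : pvPendOf operator (c :: rev) = none := by
            simp [pvPendOf, hop, hsp]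
          have hfs : pvFirstNonSpace (c :: rev) = some c := by
            simp [pvFirstNonSpace, hsp]
          have hB : pvBGo operator (pvFirstNonSpace rev) (pvPendOf operator rev) (c :: rest)
              = pvBGo operator (some c) none rest := by
            simp [pvBGo, hsp, hresf, hop]
          rw [hB]
          have := ih (c :: rev)
          rw [hfs, hpend] at this
          rw [this]
          have hA : pvAGo operator rev (c :: rest) = pvAGo operator (c :: rev) rest := by
            simp [pvAGo, hop]
          rw [hA, hhit, hresf]
          simp [pvPendRes]

-- ===== VERDICT (by name: the statement is the Claim_ definition above) =====
theorem contains_binary_operator_spec : Claim_equal_contains_binary_operator := by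
  intro text operator _
  unfold Spec_contains_binary_operator contains_binary_operator contains_binary_operator_alt
  have := pvMain operator text.toList []
  simpa [pvPendOf, pvFirstNonSpace, pvPendRes] using this.symm
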